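-- pv_equiv track=rewrite | github.com/soyukke/lean-unsolved | scripts/exploration_ck_verify_recurrence.py | compute_v2_sequence
-- ===== SOURCE A (Python) =====
-- def v2(n):
--     if n == 0: return 0
--     c = 0
--     while n % 2 == 0:
--         n //= 2
--         c += 1
--     return c
--
-- def syracuse(n):
--     m = 3 * n + 1
--     return m >> v2(m)
--
-- def compute_v2_sequence(n, k):
--     vs = []
--     cur = n
--     for _ in range(k):
--         v = v2(3 * cur + 1)
--         vs.append(v)
--         cur = syracuse(cur)
--     return vs
-- ===== SOURCE B (Python) =====
-- def compute_v2_sequence(n, k):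
--     cur = n
--     vs = []
--     for _ in range(k):
--         m = 3 * cur + 1
--         t = (m & -m).bit_length() - 1
--         vs.append(t)
--         cur = m >> t
--     return vs
-- ===== Notes on version B (the rewrite author's own statement) =====
-- stated objective: faster
-- what changed: One self-contained loop that computes each 2-adic valuation once in closed form via the bit trick (m & -m).bit_length() - 1, instead of A's helper functions with a repeated division-by-2 loop and a second redundant v2 call inside syracuse.
import Mathlib
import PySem

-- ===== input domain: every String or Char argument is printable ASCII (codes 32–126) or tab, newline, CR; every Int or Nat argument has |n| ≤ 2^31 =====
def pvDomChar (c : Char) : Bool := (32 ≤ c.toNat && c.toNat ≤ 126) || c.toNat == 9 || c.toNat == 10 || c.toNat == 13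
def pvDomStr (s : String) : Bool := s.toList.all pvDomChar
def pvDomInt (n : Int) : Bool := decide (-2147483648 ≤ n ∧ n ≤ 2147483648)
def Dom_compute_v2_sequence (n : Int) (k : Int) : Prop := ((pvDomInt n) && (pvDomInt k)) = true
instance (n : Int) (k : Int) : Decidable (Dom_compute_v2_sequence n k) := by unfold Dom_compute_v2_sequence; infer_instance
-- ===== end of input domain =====

-- B replaces A's two helper functions (a division-by-2 while loop, called twice per step)
-- by a single loop computing each valuation once with the bit trick (m & -m).bit_length() - 1.

-- ===== PORT A =====
-- the while loop of v2; the `n ≠ 0` conjunct only ensures termination (Python reaches the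
-- loop only with n ≠ 0, and even nonzero n stays nonzero under n //= 2)
def v2Loop (n : Int) (c : Int) : Int :=
  if _h : n % 2 = 0 ∧ n ≠ 0 then v2Loop (PySem.Int.floordiv n 2) (c + 1) else c
termination_by n.natAbs
decreasing_by
  rw [PySem.Int.floordiv_eq_ediv_of_pos (by norm_num)]
  omega

def v2 (n : Int) : Int := if n = 0 then 0 else v2Loop n 0

def syracuse (n : Int) : Int :=
  let m := 3 * n + 1
  m >>> (v2 m).toNat

def compute_v2_sequence (n : Int) (k : Int) : List Int :=
  ((PySem.List.pyRange 0 k 1).foldl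
    (fun (st : List Int × Int) _ =>
      let v := v2 (3 * st.2 + 1)
      (st.1 ++ [v], syracuse st.2)) ([], n)).1

-- ===== PORT B =====
-- `(m & -m).bit_length() - 1` : bitLength returns a Nat and is ≥ 1 here (m = 3*cur+1 ≠ 0),
-- so the Nat subtraction agrees with Python's int subtraction.
def compute_v2_sequence_alt (n : Int) (k : Int) : List Int :=
  ((PySem.List.pyRange 0 k 1).foldl
    (fun (st : List Int × Int) _ =>
      let m := 3 * st.2 + 1
      let t : Nat := PySem.Int.bitLength (PySem.Int.band m (-m)) - 1
      (st.1 ++ [(t : Int)], m >>> t)) ([], n)).1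

-- ===== PRECONDITION & SPEC =====
def Spec_compute_v2_sequence (n : Int) (k : Int) (out : List Int) : Prop := out = compute_v2_sequence_alt n k
instance (n : Int) (k : Int) (out : List Int) : Decidable (Spec_compute_v2_sequence n k out) := by unfold Spec_compute_v2_sequence; infer_instance

-- ===== CLAIM (what is proved, stated in full; the proofs are below) =====
def Claim_equal_compute_v2_sequence : Prop := ∀ (n : Int) (k : Int), Dom_compute_v2_sequence n k → Spec_compute_v2_sequence n k (compute_v2_sequence n k)

-- ===== LEMMAS AND PROOFS =====

theorem land2a (x y : Nat) : (2*x) &&& (2*y+1) = 2*(x &&& y) := by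
  apply Nat.eq_of_testBit_eq
  intro i
  cases i with
  | zero => simp [Nat.testBit_zero]
  | succ j => rw [Nat.testBit_succ, Nat.testBit_succ, Nat.and_div_two]
              simp [Nat.mul_add_div]

theorem land2b (x y : Nat) : (2*x+1) &&& (2*y) = 2*(x &&& y) := by
  apply Nat.eq_of_testBit_eq
  intro i
  cases i with
  | zero => simp [Nat.testBit_zero]
  | succ j => rw [Nat.testBit_succ, Nat.testBit_succ, Nat.and_div_two]
              simp [Nat.mul_add_div]

-- clearing-the-low-bit identity on Nat
theorem land_pred (t : Nat) : ∀ q : Nat, q % 2 = 1 → (2^t * q) &&& (2^t * q - 1) = 2^t * (q - 1) := by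
  induction t with
  | zero =>
    intro q hq
    obtain ⟨u, rfl⟩ : ∃ u, q = 2*u+1 := ⟨q/2, by omega⟩
    simpa using land2b u u
  | succ t ih =>
    intro q hq
    have h1 : (1:Nat) ≤ 2^t * q := Nat.mul_pos (Nat.two_pow_pos t) (by omega)
    have e1 : 2^(t+1) * q = 2 * (2^t * q) := by ring
    have e2 : 2^(t+1) * q - 1 = 2 * (2^t * q - 1) + 1 := by omega
    rw [e2, e1, land2a, ih q hq]
    ring

theorem lowbit (t q : Nat) (hq : q % 2 = 1) : 2^t*q - ((2^t*q) &&& (2^t*q - 1)) = 2^t := by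
  obtain ⟨q', rfl⟩ : ∃ q', q = q' + 1 := ⟨q - 1, by omega⟩
  rw [land_pred t _ hq]
  simp only [Nat.add_sub_cancel, Nat.mul_add, Nat.mul_one]
  generalize (2:Nat)^t = P
  omega

theorem band_self_neg (m : Int) (hm : m ≠ 0) :
    PySem.Int.band m (-m) = ((m.natAbs - (m.natAbs &&& (m.natAbs - 1)) : Nat) : Int) := by
  unfold PySem.Int.band
  rcases lt_or_gt_of_ne hm with h | h
  · rw [if_neg (by omega), if_pos (by omega)]
    have e1 : (-m).toNat = m.natAbs := by omega
    have e2 : (-m - 1).toNat = m.natAbs - 1 := by omega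
    rw [e1, e2]
  · rw [if_pos (by omega), if_neg (by omega)]
    have e1 : m.toNat = m.natAbs := by omega
    have e2 : (-(-m) - 1).toNat = m.natAbs - 1 := by omega
    rw [e1, e2]

theorem band_eq_pow (m : Int) (t q : Nat) (hm : m ≠ 0) (habs : m.natAbs = 2^t * q)
    (hq : q % 2 = 1) : PySem.Int.band m (-m) = ((2:Int))^t := by
  rw [band_self_neg m hm, habs, lowbit t q hq]
  push_cast
  ring

theorem bitLength_pow (t : Nat) : PySem.Int.bitLength ((2:Int)^t) = t + 1 := by
  induction t with
  | zero => decide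
  | succ t ih =>
    have hpos : (0:Int) < 2^(t+1) := by positivity
    rw [PySem.Int.bitLength_of_pos hpos]
    have : PySem.Int.floordiv (2^(t+1)) 2 = 2^t := by
      rw [PySem.Int.floordiv_eq_ediv_of_pos (by norm_num)]
      rw [pow_succ]
      omega
    rw [this, ih]

theorem v2Loop_eq (t : Nat) : ∀ (m c : Int) (q : Nat), m ≠ 0 → m.natAbs = 2^t * q → q % 2 = 1 →
    v2Loop m c = c + t := by
  induction t with
  | zero =>
    intro m c q hm habs hq
    have hq' : m.natAbs = q := by simpa using habs
    rw [v2Loop, dif_neg (by omega)]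
    omega
  | succ t ih =>
    intro m c q hm habs hq
    have hP : m.natAbs = 2 * (2^t * q) := by rw [habs]; ring
    have hA1 : (1:Nat) ≤ 2^t * q := Nat.mul_pos (Nat.two_pow_pos t) (by omega)
    have heven : m % 2 = 0 := by omega
    rw [v2Loop, dif_pos ⟨heven, hm⟩]
    rw [PySem.Int.floordiv_eq_ediv_of_pos (by norm_num)]
    have h1 : (m / 2).natAbs = 2^t * q := by omega
    have h2 : m / 2 ≠ 0 := by omega
    rw [ih (m/2) (c+1) q h2 h1 hq]
    push_cast
    ring

theorem v2_eq (m : Int) (t q : Nat) (hm : m ≠ 0) (habs : m.natAbs = 2^t * q)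
    (hq : q % 2 = 1) : v2 m = (t : Int) := by
  rw [v2, if_neg hm, v2Loop_eq t m 0 q hm habs hq]
  omega

-- the two loop bodies agree at every state
theorem step_eq (st : List Int × Int) (i : Int) :
    (fun (st : List Int × Int) (_ : Int) =>
      let v := v2 (3 * st.2 + 1)
      (st.1 ++ [v], syracuse st.2)) st i
    = (fun (st : List Int × Int) (_ : Int) =>
      let m := 3 * st.2 + 1
      let t : Nat := PySem.Int.bitLength (PySem.Int.band m (-m)) - 1
      (st.1 ++ [(t : Int)], m >>> t)) st i := by
  simp only []
  set m := 3 * st.2 + 1 with hmdef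
  have hm : m ≠ 0 := by omega
  obtain ⟨t, q, hq, habs⟩ := Nat.exists_eq_pow_mul_and_not_dvd (Int.natAbs_ne_zero.mpr hm) 2 (by norm_num)
  have hq1 : q % 2 = 1 := by omega
  have hv2 : v2 m = (t : Int) := v2_eq m t q hm habs hq1
  have hband : PySem.Int.bitLength (PySem.Int.band m (-m)) - 1 = t := by
    rw [band_eq_pow m t q hm habs hq1, bitLength_pow]
    omega
  rw [syracuse]
  simp only [← hmdef, hband, hv2, Int.toNat_natCast]

-- ===== VERDICT (by name: the statement is the Claim_ definition above) =====
theorem compute_v2_sequence_spec : Claim_equal_compute_v2_sequence := by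
  intro n k _
  unfold Spec_compute_v2_sequence compute_v2_sequence compute_v2_sequence_alt
  have hf := funext (fun st => funext (fun i => step_eq st i))
  rw [hf]
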